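-- pv_equiv track=rewrite | github.com/samarthjain2002/Leetcode-Solutions | Easy/[2460] Apply Operations to an Array/[2460] Apply Operations to an Array.py | applyOperations
-- ===== SOURCE A (Python) =====
-- from typing import List
--
-- def applyOperations(nums: List[int]) -> List[int]:
--     for i in range(len(nums) - 1):
--         if nums[i] == nums[i + 1]:
--             nums[i] = nums[i] * 2
--             nums[i + 1] = 0
--
--     left = 0
--     for right in range(len(nums)):
--         if nums[right] != 0:
--             nums[right], nums[left] = 0, nums[right]
--             left += 1
--
--     return nums
-- ===== SOURCE B (Python) =====
-- from typing import List
--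
-- def applyOperations(nums: List[int]) -> List[int]:
--     # One carry-based scan does the adjacent doubling, then filter-and-pad
--     # replaces the two-pointer compaction. Mutates nums in place like A.
--     if not nums:
--         return nums
--     doubled = []
--     carry = nums[0]
--     for nxt in nums[1:]:
--         if carry == nxt:
--             doubled.append(carry * 2)
--             carry = 0
--         else:
--             doubled.append(carry)
--             carry = nxt
--     doubled.append(carry)
--     kept = [x for x in doubled if x != 0]
--     nums[:] = kept + [0] * (len(nums) - len(kept))
--     return nums
-- ===== Notes on version B (the rewrite author's own statement) =====
-- stated objective: simpler
-- what changed: Replaces the index-based in-place doubling loop with a carry-based scan and the two-pointer zero compaction with filter-and-pad (kept nonzeros plus a zero count).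
import Mathlib
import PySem

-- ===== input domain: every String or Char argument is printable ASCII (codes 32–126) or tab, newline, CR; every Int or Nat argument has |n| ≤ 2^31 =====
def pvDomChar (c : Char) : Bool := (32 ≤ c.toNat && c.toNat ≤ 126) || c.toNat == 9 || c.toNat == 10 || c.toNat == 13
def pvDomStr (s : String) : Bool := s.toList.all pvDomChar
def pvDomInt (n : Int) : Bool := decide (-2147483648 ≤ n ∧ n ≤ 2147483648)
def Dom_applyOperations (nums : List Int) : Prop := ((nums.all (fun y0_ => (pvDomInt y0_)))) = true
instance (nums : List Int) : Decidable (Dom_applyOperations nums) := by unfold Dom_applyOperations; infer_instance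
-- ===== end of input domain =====

-- B replaces A's index-based doubling loop and two-pointer compaction by a carry-based
-- scan plus filter-and-pad (objective: simpler). Equivalence is about the return value;
-- both Pythons mutate `nums` in place to the same final contents.

-- ===== PORT A =====
-- Loop bodies of A's two for-loops (indices produced by range are always in bounds,
-- so getD's default 0 is never consulted).
def pvStep1 (xs : List Int) (i : Nat) : List Int :=
  if xs.getD i 0 = xs.getD (i + 1) 0 then
    (xs.set i (xs.getD i 0 * 2)).set (i + 1) 0
  else xs

def pvStep2 (st : List Int × Nat) (r : Nat) : List Int × Nat :=
  if st.1.getD r 0 ≠ 0 then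
    ((st.1.set r 0).set st.2 (st.1.getD r 0), st.2 + 1)
  else st

def applyOperations (nums : List Int) : List Int :=
  let n := nums.length
  let a := (List.range (n - 1)).foldl pvStep1 nums
  let p := (List.range n).foldl pvStep2 (a, 0)
  p.1

-- ===== PORT B =====
-- carry-based doubling scan: carry is the current left element
def altScan (carry : Int) (rest : List Int) : List Int :=
  match rest with
  | [] => [carry]
  | x :: t => if carry = x then carry * 2 :: altScan 0 t else carry :: altScan x t

def applyOperations_alt (nums : List Int) : List Int :=
  match nums with
  | [] => []
  | x :: rest =>
    let doubled := altScan x rest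
    let kept := doubled.filter (fun y => y != 0)
    kept ++ List.replicate (nums.length - kept.length) 0

-- ===== PRECONDITION & SPEC =====
def Spec_applyOperations (nums : List Int) (out : List Int) : Prop := out = applyOperations_alt nums
instance (nums : List Int) (out : List Int) : Decidable (Spec_applyOperations nums out) := by unfold Spec_applyOperations; infer_instance

-- ===== CLAIM (what is proved, stated in full; the proofs are below) =====
def Claim_equal_applyOperations : Prop := ∀ (nums : List Int), Dom_applyOperations nums → Spec_applyOperations nums (applyOperations nums)

-- ===== LEMMAS AND PROOFS =====

theorem altScan_length (carry : Int) (rest : List Int) :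
    (altScan carry rest).length = rest.length + 1 := by
  induction rest generalizing carry with
  | nil => simp [altScan]
  | cons x t ih => simp [altScan]; split <;> simp [ih]

theorem getD_mid (pre : List Int) (c : Int) (t : List Int) :
    (pre ++ c :: t).getD pre.length 0 = c := by
  rw [List.getD_append_right _ _ _ _ (le_refl _)]
  simp

theorem getD_mid1 (pre : List Int) (c x : Int) (t : List Int) :
    (pre ++ c :: x :: t).getD (pre.length + 1) 0 = x := by
  rw [List.getD_append_right _ _ _ _ (by omega)]
  simp

theorem set_mid (pre : List Int) (c : Int) (t : List Int) (v : Int) :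
    (pre ++ c :: t).set pre.length v = pre ++ v :: t := by
  rw [List.set_append]
  simp

theorem set_mid1 (pre : List Int) (c x : Int) (t : List Int) (v : Int) :
    (pre ++ c :: x :: t).set (pre.length + 1) v = pre ++ c :: v :: t := by
  rw [List.set_append]
  simp [List.set]

theorem pass1_eq (rest : List Int) : ∀ (pre : List Int) (carry : Int),
    (List.range' pre.length rest.length).foldl pvStep1 (pre ++ carry :: rest)
      = pre ++ altScan carry rest := by
  induction rest with
  | nil => intro pre carry; simp [altScan]
  | cons x t ih =>
    intro pre carry
    rw [List.length_cons, List.range'_succ, List.foldl_cons]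
    by_cases h : carry = x
    · have hs : pvStep1 (pre ++ carry :: x :: t) pre.length
          = (pre ++ [carry * 2]) ++ 0 :: t := by
        simp only [pvStep1, getD_mid, getD_mid1]
        rw [if_pos (by rw [h]), set_mid, set_mid1]
        simp
      rw [hs]
      have := ih (pre ++ [carry * 2]) 0
      simp only [List.length_append, List.length_cons, List.length_nil] at this
      rw [show pre.length + 1 = pre.length + (0+1) by omega] at this
      rw [this]
      simp [altScan, h]
    · have hs : pvStep1 (pre ++ carry :: x :: t) pre.length = (pre ++ [carry]) ++ x :: t := by
        simp only [pvStep1, getD_mid, getD_mid1]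
        rw [if_neg h]
        simp
      rw [hs]
      have := ih (pre ++ [carry]) x
      simp only [List.length_append, List.length_cons, List.length_nil] at this
      rw [show pre.length + 1 = pre.length + (0+1) by omega] at this
      rw [this]
      simp [altScan, h]

theorem zeros_cons (z : Nat) (t : List Int) :
    List.replicate z (0:Int) ++ 0 :: t = List.replicate (z+1) (0:Int) ++ t := by
  rw [List.replicate_succ']
  simp

theorem pass2_eq (suffix : List Int) : ∀ (kept : List Int) (z : Nat),
    (List.range' (kept.length + z) suffix.length).foldl pvStep2
        (kept ++ List.replicate z 0 ++ suffix, kept.length)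
      = (kept ++ suffix.filter (fun y => y != 0)
            ++ List.replicate (z + (suffix.length - (suffix.filter (fun y => y != 0)).length)) 0,
         kept.length + (suffix.filter (fun y => y != 0)).length) := by
  induction suffix with
  | nil => intro kept z; simp
  | cons v t ih =>
    intro kept z
    rw [List.length_cons, List.range'_succ, List.foldl_cons]
    have hget : ((kept ++ List.replicate z 0 ++ v :: t) : List Int).getD (kept.length + z) 0 = v := by
      have := getD_mid (kept ++ List.replicate z 0) v t
      simpa using this
    by_cases hv : v = 0
    · have hs : pvStep2 (kept ++ List.replicate z 0 ++ v :: t, kept.length) (kept.length + z)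
          = (kept ++ List.replicate (z+1) 0 ++ t, kept.length) := by
        simp only [pvStep2, hv]
        rw [if_neg (by simp)]
        rw [show (kept ++ List.replicate z (0:Int) ++ 0 :: t) = kept ++ (List.replicate z (0:Int) ++ 0 :: t) by simp,
            zeros_cons]
        simp
      rw [hs, show kept.length + z + 1 = kept.length + (z + 1) by omega, ih kept (z+1)]
      have hle : (t.filter (fun y => y != 0)).length ≤ t.length := List.length_filter_le _ _
      simp [hv, show (z + 1) + (t.length - (t.filter (fun y => y != 0)).length)
          = z + (t.length + 1 - (t.filter (fun y => y != 0)).length) by omega]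
    · have hs : pvStep2 (kept ++ List.replicate z 0 ++ v :: t, kept.length) (kept.length + z)
          = ((kept ++ [v]) ++ List.replicate z 0 ++ t, kept.length + 1) := by
        simp only [pvStep2, hget]
        rw [if_pos (by simpa using hv)]
        rw [show (kept ++ List.replicate z (0:Int) ++ v :: t).set (kept.length + z) 0
              = (kept ++ List.replicate z 0) ++ 0 :: t by
            have := set_mid (kept ++ List.replicate z 0) v t 0
            simpa using this]
        rw [List.append_assoc, zeros_cons, List.replicate_succ, List.cons_append,
            set_mid kept 0 (List.replicate z 0 ++ t) v]
        simp
      rw [hs, show kept.length + z + 1 = kept.length + 1 + z by omega]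
      have iht := ih (kept ++ [v]) z
      simp only [List.length_append, List.length_cons, List.length_nil, Nat.zero_add,
        List.append_assoc] at iht
      simp only [List.append_assoc]
      rw [iht]
      have hle : (t.filter (fun y => y != 0)).length ≤ t.length := List.length_filter_le _ _
      simp [hv, show z + (t.length - (t.filter (fun y => y != 0)).length)
          = z + (t.length + 1 - ((t.filter (fun y => y != 0)).length + 1)) by omega]
      omega

-- ===== VERDICT (by name: the statement is the Claim_ definition above) =====
theorem applyOperations_spec : Claim_equal_applyOperations := by
  intro nums _
  unfold Spec_applyOperations applyOperations applyOperations_alt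
  match nums with
  | [] => simp
  | x :: rest =>
    simp only
    have h1 : (List.range ((x :: rest).length - 1)).foldl pvStep1 (x :: rest)
        = altScan x rest := by
      have := pass1_eq rest [] x
      simpa [List.range_eq_range'] using this
    rw [h1]
    have hlen : (altScan x rest).length = (x :: rest).length := by
      rw [altScan_length]; simp
    have h2 := pass2_eq (altScan x rest) [] 0
    simp only [List.length_nil, List.nil_append, List.replicate_zero, Nat.zero_add] at h2
    rw [← hlen, List.range_eq_range', h2]
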